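-- pv_equiv track=rewrite | github.com/rrwick/Trycycler-paper | scripts/error_positions.py | get_error_positions
-- ===== SOURCE A (Python) =====
-- def get_error_positions(expanded_cigar):
--     errors = []
--     mismatches, insertions, deletions = 0, 0, 0
--     for i, c in enumerate(expanded_cigar):
--         if c == '=':
--             pass
--         elif c == 'X':
--             mismatches += 1
--             errors.append(i)
--         elif c == 'I':
--             insertions += 1
--             errors.append(i)
--         elif c == 'D':
--             deletions += 1
--             errors.append(i)
--     return errors, mismatches, insertions, deletions
-- ===== SOURCE B (Python) =====
-- def get_error_positions(expanded_cigar):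
--     errors = [i for i, c in enumerate(expanded_cigar) if c in ('X', 'I', 'D')]
--     mismatches = expanded_cigar.count('X')
--     insertions = expanded_cigar.count('I')
--     deletions = expanded_cigar.count('D')
--     return errors, mismatches, insertions, deletions
-- ===== Notes on version B (the rewrite author's own statement) =====
-- stated objective: simpler
-- what changed: Replaces the single accumulating loop over four pieces of state with independent scans: a comprehension collecting error indices and three str.count calls for the per-type totals.
import Mathlib
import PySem

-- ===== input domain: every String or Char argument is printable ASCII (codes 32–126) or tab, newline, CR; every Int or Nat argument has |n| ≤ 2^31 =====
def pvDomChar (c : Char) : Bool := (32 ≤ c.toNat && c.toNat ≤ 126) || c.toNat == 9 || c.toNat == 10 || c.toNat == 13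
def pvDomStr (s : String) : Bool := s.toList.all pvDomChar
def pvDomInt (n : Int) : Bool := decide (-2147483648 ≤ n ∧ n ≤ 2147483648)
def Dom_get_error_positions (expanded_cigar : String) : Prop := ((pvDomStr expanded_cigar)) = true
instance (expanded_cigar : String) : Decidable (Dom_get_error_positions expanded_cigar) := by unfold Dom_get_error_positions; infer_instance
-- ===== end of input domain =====

-- B replaces A's single four-accumulator loop by independent scans (an index comprehension plus three str.count calls); simpler, same O(n) cost.


-- ===== PORT A =====
-- for i, c in enumerate(expanded_cigar): if/elif chain updating four accumulators
def stepA (st : List Int × Int × Int × Int) (p : Int × Char) : List Int × Int × Int × Int :=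
  if p.2 == '=' then st
  else if p.2 == 'X' then (st.1 ++ [p.1], st.2.1 + 1, st.2.2.1, st.2.2.2)
  else if p.2 == 'I' then (st.1 ++ [p.1], st.2.1, st.2.2.1 + 1, st.2.2.2)
  else if p.2 == 'D' then (st.1 ++ [p.1], st.2.1, st.2.2.1, st.2.2.2 + 1)
  else st

def get_error_positions (expanded_cigar : String) : List Int × Int × Int × Int :=
  (PySem.List.enumerate expanded_cigar.toList 0).foldl stepA ([], 0, 0, 0)

-- ===== PORT B =====
-- errors via a comprehension over enumerate; the three totals via str.count
def get_error_positions_alt (expanded_cigar : String) : List Int × Int × Int × Int :=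
  (((PySem.List.enumerate expanded_cigar.toList 0).filter
      (fun p => p.2 == 'X' || p.2 == 'I' || p.2 == 'D')).map (·.1),
   (PySem.Str.count expanded_cigar "X" : Int),
   (PySem.Str.count expanded_cigar "I" : Int),
   (PySem.Str.count expanded_cigar "D" : Int))

-- ===== PRECONDITION & SPEC =====
def Spec_get_error_positions (expanded_cigar : String) (out : List Int × Int × Int × Int) : Prop := out = get_error_positions_alt expanded_cigar
instance (expanded_cigar : String) (out : List Int × Int × Int × Int) : Decidable (Spec_get_error_positions expanded_cigar out) := by unfold Spec_get_error_positions; infer_instance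

-- ===== CLAIM (what is proved, stated in full; the proofs are below) =====
def Claim_equal_get_error_positions : Prop := ∀ (expanded_cigar : String), Dom_get_error_positions expanded_cigar → Spec_get_error_positions expanded_cigar (get_error_positions expanded_cigar)

-- ===== LEMMAS AND PROOFS =====

-- single-char str.count equals list count
lemma chars_count_go_singleton (c : Char) (l : List Char) (fuel acc : Nat)
    (h : l.length ≤ fuel) :
    PySem.Chars.count.go [c] fuel l acc = acc + l.count c := by
  induction l generalizing fuel acc with
  | nil => cases fuel <;> simp [PySem.Chars.count.go]
  | cons x t ih =>
    cases fuel with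
    | zero => simp at h
    | succ f =>
      simp only [PySem.Chars.count.go]
      by_cases hx : x = c
      · subst hx
        rw [if_pos (by simp [List.isPrefixOf]),
          show List.drop [x].length (x :: t) = t from rfl,
          ih _ _ (by simpa using h)]
        simp [List.count_cons]
        omega
      · have : ¬ ([c].isPrefixOf (x :: t) = true) := by
          simp [List.isPrefixOf]; exact fun hxc => absurd hxc.symm hx
        rw [if_neg this, ih _ _ (by simpa using h)]
        simp [hx]

lemma chars_count_singleton (c : Char) (l : List Char) :
    PySem.Chars.count l [c] = l.count c := by
  rw [PySem.Chars.count, if_neg (by simp), chars_count_go_singleton c l l.length 0 le_rfl]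
  omega

lemma stepA_other (st : List Int × Int × Int × Int) (i : Int) (c : Char)
    (h1 : c ≠ '=') (h2 : c ≠ 'X') (h3 : c ≠ 'I') (h4 : c ≠ 'D') :
    stepA st (i, c) = st := by
  simp [stepA, h1, h2, h3, h4]

lemma foldA (l : List Char) (i : Int) (errs : List Int) (m ins d : Int) :
    (PySem.List.enumerate l i).foldl stepA (errs, m, ins, d)
    = (errs ++ ((PySem.List.enumerate l i).filter
          (fun p => p.2 == 'X' || p.2 == 'I' || p.2 == 'D')).map (·.1),
       m + (l.count 'X' : Int), ins + (l.count 'I' : Int), d + (l.count 'D' : Int)) := by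
  induction l generalizing i errs m ins d with
  | nil => simp [PySem.List.enumerate_nil]
  | cons c t ih =>
    rw [PySem.List.enumerate_cons, List.foldl_cons, List.filter_cons]
    by_cases h1 : c = '='
    · subst h1
      rw [show stepA (errs, m, ins, d) (i, '=') = (errs, m, ins, d) from rfl, ih]
      simp [List.count_cons]
    · by_cases h2 : c = 'X'
      · subst h2
        rw [show stepA (errs, m, ins, d) (i, 'X')
              = (errs ++ [i], m + 1, ins, d) from rfl, ih]
        simp [List.count_cons]
        omega
      · by_cases h3 : c = 'I'
        · subst h3
          rw [show stepA (errs, m, ins, d) (i, 'I')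
                = (errs ++ [i], m, ins + 1, d) from rfl, ih]
          simp [List.count_cons]
          omega
        · by_cases h4 : c = 'D'
          · subst h4
            rw [show stepA (errs, m, ins, d) (i, 'D')
                  = (errs ++ [i], m, ins, d + 1) from rfl, ih]
            simp [List.count_cons]
            omega
          · rw [stepA_other _ _ _ h1 h2 h3 h4, ih]
            simp [List.count_cons, h1, h2, h3, h4]

-- ===== VERDICT (by name: the statement is the Claim_ definition above) =====
theorem get_error_positions_spec : Claim_equal_get_error_positions := by
  intro s _
  unfold Spec_get_error_positions get_error_positions get_error_positions_alt
  rw [foldA]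
  simp [PySem.Str.count_eq, chars_count_singleton]
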